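-- pv_equiv track=rewrite | github.com/larynx95/rosalind | src/ba05/ba05f_align_local/ba05f.py | lcs_score_backtrack
-- ===== SOURCE A (Python) =====
-- def lcs_score_backtrack(edges, v, w, sigma = 5):
--     """
--     ({(str,str):int},str,str,int) -> {(int,int):int}
--     returns a dynamic table
--     """
--     s = {}
--     score = 0
--     for i in range(len(v)+1):
--         s[(i,0)] = 0                # s[(i,0)] = -sigma * i
--     for j in range(len(w)+1):
--         s[(0,j)] = 0                # s[(0,j)] = -sigma * j
--     for i in range(len(v)):
--         for j in range(len(w)):
--             horizontally = 0 if s[(i,j+1)] - sigma < 0 else s[(i,j+1)] - sigma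
--             vertically   = 0 if s[(i+1,j)] - sigma < 0 else s[(i+1,j)] - sigma
--             diagonally   = 0 if s[(i,j)] + edges[(v[i], w[j])] < 0 else s[(i,j)] + edges[(v[i], w[j])]
--             s[(i+1,j+1)] = max(horizontally, vertically, diagonally)
--     return s
-- ===== SOURCE B (Python) =====
-- def lcs_score_backtrack(edges, v, w, sigma = 5):
--     """Top-down memoized recursion (demand-driven) instead of A's bottom-up
--     nested passes; the dict is then materialised in the canonical key order."""
--     n, m = len(v), len(w)
--     memo = {}
--     def fill(i, j):
--         if (i, j) in memo:
--             return memo[(i, j)]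
--         if i == 0 or j == 0:
--             memo[(i, j)] = 0
--             return 0
--         h = fill(i, j - 1) - sigma
--         vt = fill(i - 1, j) - sigma
--         d = fill(i - 1, j - 1) + edges[(v[i - 1], w[j - 1])]
--         val = max(h if h > 0 else 0, vt if vt > 0 else 0, d if d > 0 else 0)
--         memo[(i, j)] = val
--         return val
--     fill(n, m)
--     s = {}
--     for i in range(n + 1):
--         s[(i, 0)] = 0
--     for j in range(m + 1):
--         s[(0, j)] = 0
--     for i in range(n):
--         for j in range(m):
--             s[(i + 1, j + 1)] = memo[(i + 1, j + 1)]
--     return s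
-- ===== Notes on version B (the rewrite author's own statement) =====
-- stated objective: alternative
-- what changed: B replaces A's bottom-up nested row-major passes by a top-down memoized recursion fill(i,j) that demands each cell's three predecessors recursively, then materialises the dict in the canonical key order; same return value.
import Mathlib
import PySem

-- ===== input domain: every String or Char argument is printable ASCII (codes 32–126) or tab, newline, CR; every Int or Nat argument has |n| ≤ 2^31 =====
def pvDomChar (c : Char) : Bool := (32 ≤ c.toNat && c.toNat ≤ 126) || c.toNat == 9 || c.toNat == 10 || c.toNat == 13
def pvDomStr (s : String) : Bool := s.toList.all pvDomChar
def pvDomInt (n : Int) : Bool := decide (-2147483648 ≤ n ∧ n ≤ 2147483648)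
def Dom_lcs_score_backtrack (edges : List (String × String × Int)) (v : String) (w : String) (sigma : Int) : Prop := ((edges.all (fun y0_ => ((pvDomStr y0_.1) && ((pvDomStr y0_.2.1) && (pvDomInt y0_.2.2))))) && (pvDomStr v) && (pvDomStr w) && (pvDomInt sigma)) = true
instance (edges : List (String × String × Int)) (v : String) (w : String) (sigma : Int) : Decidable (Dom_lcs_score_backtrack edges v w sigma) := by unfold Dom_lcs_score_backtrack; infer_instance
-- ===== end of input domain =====

-- B replaces A's bottom-up nested row-major passes by a top-down memoized recursion that demands
-- each cell's three predecessors, then materialises the dict in the canonical key order;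
-- same return value (objective: alternative decomposition, not speed).

-- ===== PORT A =====
-- shared helper: ports the dict lookup edges[(a, b)] (first match; Python raises KeyError when the
-- key is absent — such inputs are excluded by Pre_, so the default 0 is never reached there)
def edgeGet (edges : List (String × String × Int)) (a b : String) : Int :=
  match edges.find? (fun e => e.1 == a && e.2.1 == b) with
  | some e => e.2.2
  | none => 0

-- shared helper: ports the two boundary-initialisation loops (identical lines in Source A and Source B)
def initDict (n m : Nat) : PySem.Dict (Int × Int) Int :=
  (List.range (m + 1)).foldl (fun d (j : Nat) => d.insert ((0 : Int), (j : Int)) 0)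
    ((List.range (n + 1)).foldl (fun d (i : Nat) => d.insert ((i : Int), (0 : Int)) 0) PySem.Dict.empty)

-- one inner-loop step of A: the three clamped candidates and the insert
-- (the three looked-up keys are always present in s, so getD 0 is exact here)
def aCell (edges : List (String × String × Int)) (sigma : Int) (vl wl : List Char)
    (d : PySem.Dict (Int × Int) Int) (i j : Nat) : PySem.Dict (Int × Int) Int :=
  let horizontally := if d.getD ((i : Int), (j : Int) + 1) 0 - sigma < 0 then 0 else d.getD ((i : Int), (j : Int) + 1) 0 - sigma
  let vertically := if d.getD ((i : Int) + 1, (j : Int)) 0 - sigma < 0 then 0 else d.getD ((i : Int) + 1, (j : Int)) 0 - sigma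
  let diag0 := d.getD ((i : Int), (j : Int)) 0 + edgeGet edges (String.singleton (vl.getD i ' ')) (String.singleton (wl.getD j ' '))
  let diagonally := if diag0 < 0 then 0 else diag0
  d.insert ((i : Int) + 1, (j : Int) + 1) (max (max horizontally vertically) diagonally)

def lcs_score_backtrack (edges : List (String × String × Int)) (v : String) (w : String) (sigma : Int) : List (Int × Int × Int) :=
  let vl := v.toList
  let wl := w.toList
  let s := (List.range vl.length).foldl
    (fun d (i : Nat) => (List.range wl.length).foldl (fun d (j : Nat) => aCell edges sigma vl wl d i j) d)
    (initDict vl.length wl.length)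
  s.items.map (fun p => (p.1.1, p.1.2, p.2))

-- ===== PORT B =====
-- Source B's inner function fill(i, j): memo hit, boundary, otherwise three recursive demands;
-- the memo dict is threaded through as state.  The fuel argument is only a structural totality
-- guard (the caller passes |v| + |w| + 1 > i + j, so the fuel-0 branch is never reached).
def fillB (edges : List (String × String × Int)) (sigma : Int) (vl wl : List Char) :
    Nat → Nat → Nat → PySem.Dict (Int × Int) Int → Int × PySem.Dict (Int × Int) Int
  | 0, _, _, memo => (0, memo)
  | fuel + 1, i, j, memo =>
    match memo.get? ((i : Int), (j : Int)) with
    | some x => (x, memo)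
    | none =>
      if i = 0 ∨ j = 0 then (0, memo.insert ((i : Int), (j : Int)) 0)
      else
        let p1 := fillB edges sigma vl wl fuel i (j - 1) memo
        let p2 := fillB edges sigma vl wl fuel (i - 1) j p1.2
        let p3 := fillB edges sigma vl wl fuel (i - 1) (j - 1) p2.2
        let h := p1.1 - sigma
        let vt := p2.1 - sigma
        let d := p3.1 + edgeGet edges (String.singleton (vl.getD (i - 1) ' ')) (String.singleton (wl.getD (j - 1) ' '))
        let val := max (max (if h > 0 then h else 0) (if vt > 0 then vt else 0)) (if d > 0 then d else 0)
        (val, p3.2.insert ((i : Int), (j : Int)) val)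

def lcs_score_backtrack_alt (edges : List (String × String × Int)) (v : String) (w : String) (sigma : Int) : List (Int × Int × Int) :=
  let vl := v.toList
  let wl := w.toList
  let memo := (fillB edges sigma vl wl (vl.length + wl.length + 1) vl.length wl.length PySem.Dict.empty).2
  -- the memo[(i+1, j+1)] lookup: the key is always present (proved below), so the default 0 is never used
  let s := (List.range vl.length).foldl
    (fun d (i : Nat) => (List.range wl.length).foldl
      (fun d (j : Nat) => d.insert ((i : Int) + 1, (j : Int) + 1) (memo.getD ((i : Int) + 1, (j : Int) + 1) 0)) d)
    (initDict vl.length wl.length)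
  s.items.map (fun p => (p.1.1, p.1.2, p.2))

-- ===== PRECONDITION & SPEC =====
-- Pre_ excludes exactly the inputs on which Python A raises KeyError: some needed pair
-- (v[i], w[j]) is not a key of edges.  (Both Pythons raise there; the ports use default 0.)
def Pre_lcs_score_backtrack (edges : List (String × String × Int)) (v : String) (w : String) (sigma : Int) : Prop :=
  (v.toList.all (fun c => w.toList.all (fun d =>
    edges.any (fun p => p.1.toList == [c] && p.2.1.toList == [d])))) = true
instance (edges : List (String × String × Int)) (v : String) (w : String) (sigma : Int) : Decidable (Pre_lcs_score_backtrack edges v w sigma) := by unfold Pre_lcs_score_backtrack; infer_instance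

def pvWitness_lcs_score_backtrack : (List (String × String × Int)) × String × String × Int :=
  ([("A", "A", 1), ("A", "B", -2), ("B", "A", -2), ("B", "B", 1)], "AB", "BA", 5)

def Spec_lcs_score_backtrack (edges : List (String × String × Int)) (v : String) (w : String) (sigma : Int) (out : List (Int × Int × Int)) : Prop := out = lcs_score_backtrack_alt edges v w sigma
instance (edges : List (String × String × Int)) (v : String) (w : String) (sigma : Int) (out : List (Int × Int × Int)) : Decidable (Spec_lcs_score_backtrack edges v w sigma out) := by unfold Spec_lcs_score_backtrack; infer_instance

-- ===== CLAIM (what is proved, stated in full; the proofs are below) =====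
def Claim_equal_lcs_score_backtrack : Prop := ∀ (edges : List (String × String × Int)) (v : String) (w : String) (sigma : Int), Dom_lcs_score_backtrack edges v w sigma → Pre_lcs_score_backtrack edges v w sigma → Spec_lcs_score_backtrack edges v w sigma (lcs_score_backtrack edges v w sigma)

-- ===== LEMMAS AND PROOFS =====

-- the mathematical DP table both programs compute
def tbl (e : List (String × String × Int)) (σ : Int) (vl wl : List Char) : Nat → Nat → Int
  | 0, _ => 0
  | _ + 1, 0 => 0
  | i + 1, j + 1 =>
    max (max (max (tbl e σ vl wl (i + 1) j - σ) (tbl e σ vl wl i (j + 1) - σ))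
      (tbl e σ vl wl i j + edgeGet e (String.singleton (vl.getD i ' ')) (String.singleton (wl.getD j ' ')))) 0

lemma tbl_zero_left (e : List (String × String × Int)) (σ : Int) (vl wl : List Char) (j : Nat) :
    tbl e σ vl wl 0 j = 0 := by cases j <;> simp [tbl]

lemma tbl_zero_right (e : List (String × String × Int)) (σ : Int) (vl wl : List Char) (i : Nat) :
    tbl e σ vl wl i 0 = 0 := by cases i <;> simp [tbl]

lemma tbl_succ (e : List (String × String × Int)) (σ : Int) (vl wl : List Char) (i j : Nat) :
    tbl e σ vl wl (i + 1) (j + 1) =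
      max (max (max (tbl e σ vl wl (i + 1) j - σ) (tbl e σ vl wl i (j + 1) - σ))
        (tbl e σ vl wl i j + edgeGet e (String.singleton (vl.getD i ' ')) (String.singleton (wl.getD j ' ')))) 0 := by
  simp [tbl]

lemma clampmax (σ a b c : Int) :
    max (max (if a - σ < 0 then 0 else a - σ) (if b - σ < 0 then 0 else b - σ)) (if c < 0 then 0 else c)
      = max (max (max (b - σ) (a - σ)) c) 0 := by
  simp only [Int.max_def]; split_ifs <;> omega

lemma maxclamp (a b c : Int) :
    max (max (if a > 0 then a else 0) (if b > 0 then b else 0)) (if c > 0 then c else 0)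
      = max (max (max a b) c) 0 := by
  simp only [Int.max_def]; split_ifs <;> omega

-- ---- memo invariants for fillB ----

def SoundM (e : List (String × String × Int)) (σ : Int) (vl wl : List Char)
    (m : PySem.Dict (Int × Int) Int) : Prop :=
  ∀ (a b : Nat) (x : Int), m.get? ((a : Int), (b : Int)) = some x → x = tbl e σ vl wl a b

def HasM (m : PySem.Dict (Int × Int) Int) (a b : Nat) : Prop :=
  ∃ x, m.get? ((a : Int), (b : Int)) = some x

def ClosedM (m : PySem.Dict (Int × Int) Int) : Prop :=
  ∀ a b : Nat, HasM m a b → 1 ≤ a → 1 ≤ b → ∀ a' b' : Nat, a' ≤ a → b' ≤ b → HasM m a' b'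

def MonoM (m m' : PySem.Dict (Int × Int) Int) : Prop :=
  ∀ (k : Int × Int) (x : Int), m.get? k = some x → m'.get? k = some x

lemma key_eq_iff (a b i j : Nat) :
    (((a : Int), (b : Int)) = ((i : Int), (j : Int))) ↔ (a = i ∧ b = j) := by
  simp [Prod.ext_iff]

lemma has_insert_iff (m : PySem.Dict (Int × Int) Int) (i j a b : Nat) (v : Int) :
    HasM (m.insert ((i : Int), (j : Int)) v) a b ↔ (a = i ∧ b = j) ∨ HasM m a b := by
  constructor
  · rintro ⟨x, hx⟩
    rw [PySem.Dict.get?_insert] at hx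
    split_ifs at hx with h
    · exact Or.inl ((key_eq_iff a b i j).1 h)
    · exact Or.inr ⟨x, hx⟩
  · rintro (⟨rfl, rfl⟩ | ⟨x, hx⟩)
    · exact ⟨v, by rw [PySem.Dict.get?_insert, if_pos rfl]⟩
    · by_cases h : ((a : Int), (b : Int)) = ((i : Int), (j : Int))
      · exact ⟨v, by rw [PySem.Dict.get?_insert, if_pos h]⟩
      · exact ⟨x, by rw [PySem.Dict.get?_insert, if_neg h]; exact hx⟩

lemma mono_has (m m' : PySem.Dict (Int × Int) Int) (hm : MonoM m m') (a b : Nat)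
    (h : HasM m a b) : HasM m' a b := by
  obtain ⟨x, hx⟩ := h; exact ⟨x, hm _ x hx⟩

lemma mono_trans (m1 m2 m3 : PySem.Dict (Int × Int) Int) (h1 : MonoM m1 m2) (h2 : MonoM m2 m3) :
    MonoM m1 m3 := fun k x hx => h2 k x (h1 k x hx)

lemma sound_insert (e : List (String × String × Int)) (σ : Int) (vl wl : List Char)
    (m : PySem.Dict (Int × Int) Int) (hS : SoundM e σ vl wl m) (i j : Nat) :
    SoundM e σ vl wl (m.insert ((i : Int), (j : Int)) (tbl e σ vl wl i j)) := by
  intro a b x hx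
  rw [PySem.Dict.get?_insert] at hx
  split_ifs at hx with h
  · obtain ⟨rfl, rfl⟩ := (key_eq_iff a b i j).1 h
    exact (Option.some.injEq _ _ ▸ hx).symm ▸ rfl
  · exact hS a b x hx

lemma mono_insert_sound (e : List (String × String × Int)) (σ : Int) (vl wl : List Char)
    (m : PySem.Dict (Int × Int) Int) (hS : SoundM e σ vl wl m) (i j : Nat) :
    MonoM m (m.insert ((i : Int), (j : Int)) (tbl e σ vl wl i j)) := by
  intro k x hx
  rw [PySem.Dict.get?_insert]
  split_ifs with h
  · subst h
    rw [hS i j x hx]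
  · exact hx

lemma sound_empty (e : List (String × String × Int)) (σ : Int) (vl wl : List Char) :
    SoundM e σ vl wl PySem.Dict.empty := by
  intro a b x hx
  rw [PySem.Dict.get?_empty] at hx
  cases hx

lemma closed_empty : ClosedM PySem.Dict.empty := by
  rintro a b ⟨x, hx⟩
  rw [PySem.Dict.get?_empty] at hx
  cases hx

-- the two cheap branches of fillB, shared by the induction below
lemma fillB_hit (e : List (String × String × Int)) (σ : Int) (vl wl : List Char) (fuel i j : Nat)
    (memo : PySem.Dict (Int × Int) Int) (hS : SoundM e σ vl wl memo) (hC : ClosedM memo)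
    (x : Int) (hget : memo.get? ((i : Int), (j : Int)) = some x) :
    (fillB e σ vl wl (fuel + 1) i j memo).1 = tbl e σ vl wl i j ∧
    SoundM e σ vl wl (fillB e σ vl wl (fuel + 1) i j memo).2 ∧
    ClosedM (fillB e σ vl wl (fuel + 1) i j memo).2 ∧
    MonoM memo (fillB e σ vl wl (fuel + 1) i j memo).2 ∧
    (fillB e σ vl wl (fuel + 1) i j memo).2.get? ((i : Int), (j : Int)) = some (tbl e σ vl wl i j) := by
  have heq : fillB e σ vl wl (fuel + 1) i j memo = (x, memo) := by
    rw [fillB, hget]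
  rw [heq]
  refine ⟨hS i j x hget, hS, hC, fun k y hy => hy, ?_⟩
  rw [hget, hS i j x hget]

lemma fillB_base (e : List (String × String × Int)) (σ : Int) (vl wl : List Char) (fuel i j : Nat)
    (memo : PySem.Dict (Int × Int) Int) (hS : SoundM e σ vl wl memo) (hC : ClosedM memo)
    (hget : memo.get? ((i : Int), (j : Int)) = none) (h0 : i = 0 ∨ j = 0) :
    (fillB e σ vl wl (fuel + 1) i j memo).1 = tbl e σ vl wl i j ∧
    SoundM e σ vl wl (fillB e σ vl wl (fuel + 1) i j memo).2 ∧
    ClosedM (fillB e σ vl wl (fuel + 1) i j memo).2 ∧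
    MonoM memo (fillB e σ vl wl (fuel + 1) i j memo).2 ∧
    (fillB e σ vl wl (fuel + 1) i j memo).2.get? ((i : Int), (j : Int)) = some (tbl e σ vl wl i j) := by
  have htbl : tbl e σ vl wl i j = 0 := by
    rcases h0 with rfl | rfl
    · exact tbl_zero_left e σ vl wl j
    · exact tbl_zero_right e σ vl wl i
  have heq : fillB e σ vl wl (fuel + 1) i j memo = (0, memo.insert ((i : Int), (j : Int)) 0) := by
    rw [fillB, hget, if_pos h0]
  rw [heq, ← htbl]
  refine ⟨rfl, sound_insert e σ vl wl memo hS i j, ?_, mono_insert_sound e σ vl wl memo hS i j,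
    PySem.Dict.get?_insert_self _ _ _⟩
  intro a b hab h1a h1b a' b' ha' hb'
  rcases (has_insert_iff memo i j a b _).1 hab with ⟨rfl, rfl⟩ | hold
  · omega
  · exact (has_insert_iff memo i j a' b' _).2 (Or.inr (hC a b hold h1a h1b a' b' ha' hb'))

-- the main invariant lemma: fillB returns tbl i j, keeps the memo sound, closed and monotone,
-- and records the cell it was asked for
lemma fillB_main (e : List (String × String × Int)) (σ : Int) (vl wl : List Char) :
    ∀ (fuel i j : Nat), i + j < fuel → ∀ memo, SoundM e σ vl wl memo → ClosedM memo →
      (fillB e σ vl wl fuel i j memo).1 = tbl e σ vl wl i j ∧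
      SoundM e σ vl wl (fillB e σ vl wl fuel i j memo).2 ∧
      ClosedM (fillB e σ vl wl fuel i j memo).2 ∧
      MonoM memo (fillB e σ vl wl fuel i j memo).2 ∧
      (fillB e σ vl wl fuel i j memo).2.get? ((i : Int), (j : Int)) = some (tbl e σ vl wl i j) := by
  intro fuel
  induction fuel with
  | zero => intro i j hij; omega
  | succ fuel ih =>
    intro i j hij memo hS hC
    rcases hget : memo.get? ((i : Int), (j : Int)) with _ | x
    case some => exact fillB_hit e σ vl wl fuel i j memo hS hC x hget
    case none =>
    by_cases h0 : i = 0 ∨ j = 0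
    · exact fillB_base e σ vl wl fuel i j memo hS hC hget h0
    obtain ⟨i', rfl⟩ : ∃ i', i = i' + 1 := ⟨i - 1, by omega⟩
    obtain ⟨j', rfl⟩ : ∃ j', j = j' + 1 := ⟨j - 1, by omega⟩
    obtain ⟨h1v, h1S, h1C, h1M, h1g⟩ := ih (i' + 1) j' (by omega) memo hS hC
    obtain ⟨h2v, h2S, h2C, h2M, h2g⟩ := ih i' (j' + 1) (by omega) _ h1S h1C
    obtain ⟨h3v, h3S, h3C, h3M, h3g⟩ := ih i' j' (by omega) _ h2S h2C
    have heq : fillB e σ vl wl (fuel + 1) (i' + 1) (j' + 1) memo =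
        (tbl e σ vl wl (i' + 1) (j' + 1),
          (fillB e σ vl wl fuel i' j'
            (fillB e σ vl wl fuel i' (j' + 1)
              (fillB e σ vl wl fuel (i' + 1) j' memo).2).2).2.insert
            (((i' + 1 : Nat) : Int), ((j' + 1 : Nat) : Int)) (tbl e σ vl wl (i' + 1) (j' + 1))) := by
      rw [fillB, hget, if_neg h0]
      simp only [Nat.add_sub_cancel]
      rw [h1v, h2v, h3v, maxclamp]
      rw [← tbl_succ]
    have hM13 : MonoM memo (fillB e σ vl wl fuel i' j'
        (fillB e σ vl wl fuel i' (j' + 1) (fillB e σ vl wl fuel (i' + 1) j' memo).2).2).2 :=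
      mono_trans _ _ _ (mono_trans _ _ _ h1M h2M) h3M
    have hM23 : MonoM (fillB e σ vl wl fuel (i' + 1) j' memo).2 (fillB e σ vl wl fuel i' j'
        (fillB e σ vl wl fuel i' (j' + 1) (fillB e σ vl wl fuel (i' + 1) j' memo).2).2).2 :=
      mono_trans _ _ _ h2M h3M
    set m3 := (fillB e σ vl wl fuel i' j'
        (fillB e σ vl wl fuel i' (j' + 1) (fillB e σ vl wl fuel (i' + 1) j' memo).2).2).2 with hm3
    have hHas1 : HasM m3 (i' + 1) j' := mono_has _ _ hM23 _ _ ⟨_, h1g⟩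
    have hHas2 : HasM m3 i' (j' + 1) := mono_has _ _ h3M _ _ ⟨_, h2g⟩
    have hHas3 : HasM m3 i' j' := ⟨_, h3g⟩
    rw [heq]
    refine ⟨rfl, sound_insert e σ vl wl m3 h3S _ _, ?_,
      mono_trans _ _ _ hM13 (mono_insert_sound e σ vl wl m3 h3S _ _),
      PySem.Dict.get?_insert_self _ _ _⟩
    -- closedness of the final memo
    intro a b hab h1a h1b a' b' ha' hb'
    rcases (has_insert_iff m3 (i' + 1) (j' + 1) a b _).1 hab with ⟨rfl, rfl⟩ | hold
    · -- every (a', b') with a' ≤ i'+1, b' ≤ j'+1 is already in m3, or is the freshly inserted cell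
      refine (has_insert_iff m3 (i' + 1) (j' + 1) a' b' _).2 ?_
      by_cases hb'j : b' = j' + 1
      · by_cases ha'i : a' = i' + 1
        · exact Or.inl ⟨ha'i, hb'j⟩
        · subst hb'j
          by_cases hi0 : i' = 0
          · have : a' = i' := by omega
            subst this
            exact Or.inr hHas2
          · exact Or.inr (h3C i' (j' + 1) hHas2 (by omega) (by omega) a' (j' + 1) (by omega) le_rfl)
      · have hb'le : b' ≤ j' := by omega
        by_cases ha'i : a' = i' + 1
        · subst ha'i
          by_cases hj0 : j' = 0
          · have : b' = j' := by omega
            subst this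
            exact Or.inr hHas1
          · exact Or.inr (h3C (i' + 1) j' hHas1 (by omega) (by omega) (i' + 1) b' le_rfl hb'le)
        · have ha'le : a' ≤ i' := by omega
          by_cases hi0 : i' = 0
          · by_cases hj0 : j' = 0
            · have hae : a' = i' := by omega
              have hbe : b' = j' := by omega
              subst hae hbe
              exact Or.inr hHas3
            · exact Or.inr (h3C (i' + 1) j' hHas1 (by omega) (by omega) a' b' (by omega) hb'le)
          · by_cases hj0 : j' = 0
            · exact Or.inr (h3C i' (j' + 1) hHas2 (by omega) (by omega) a' b' ha'le (by omega))
            · exact Or.inr (h3C i' j' hHas3 (by omega) (by omega) a' b' ha'le hb'le)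
    · exact (has_insert_iff m3 (i' + 1) (j' + 1) a' b' _).2
        (Or.inr (h3C a b hold h1a h1b a' b' ha' hb'))

lemma fillB_getD (e : List (String × String × Int)) (σ : Int) (vl wl : List Char) (i j : Nat)
    (hi : i < vl.length) (hj : j < wl.length) :
    (fillB e σ vl wl (vl.length + wl.length + 1) vl.length wl.length PySem.Dict.empty).2.getD
        ((i : Int) + 1, (j : Int) + 1) 0 = tbl e σ vl wl (i + 1) (j + 1) := by
  obtain ⟨-, hS, hC, -, hTop⟩ := fillB_main e σ vl wl (vl.length + wl.length + 1) vl.length wl.length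
    (by omega) PySem.Dict.empty (sound_empty e σ vl wl) closed_empty
  obtain ⟨x, hx⟩ := hC vl.length wl.length ⟨_, hTop⟩ (by omega) (by omega) (i + 1) (j + 1)
    (by omega) (by omega)
  have hv := hS (i + 1) (j + 1) x hx
  have hcast : ((((i + 1 : Nat)) : Int), (((j + 1 : Nat)) : Int)) = ((i : Int) + 1, (j : Int) + 1) := by
    push_cast; rfl
  rw [← hcast, PySem.Dict.getD_eq_get?_getD, hx, hv]
  rfl

-- ---- the emitted dict (shared by both ports' final shape proofs) ----

def Ftbl (e : List (String × String × Int)) (σ : Int) (vl wl : List Char) : (Int × Int) → Int :=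
  fun p => tbl e σ vl wl p.1.toNat p.2.toNat

def initItems (n m : Nat) : List ((Int × Int) × Int) :=
  ((List.range (n + 1)).map fun (i : Nat) => (((i : Int), (0 : Int)), (0 : Int)))
    ++ ((List.range' 1 m).map fun (j : Nat) => (((0 : Int), (j : Int)), (0 : Int)))

def bodyPart (e : List (String × String × Int)) (σ : Int) (vl wl : List Char) (i j : Nat) : List ((Int × Int) × Int) :=
  ((List.range i).flatMap fun (a : Nat) => (List.range wl.length).map fun (b : Nat) => ((((a : Int)) + 1, ((b : Int)) + 1), tbl e σ vl wl (a + 1) (b + 1)))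
    ++ ((List.range j).map fun (b : Nat) => ((((i : Int)) + 1, ((b : Int)) + 1), tbl e σ vl wl (i + 1) (b + 1)))

def fullItems (e : List (String × String × Int)) (σ : Int) (vl wl : List Char) (i j : Nat) : List ((Int × Int) × Int) :=
  initItems vl.length wl.length ++ bodyPart e σ vl wl i j

-- first-match lookup over a value-consistent association list
lemma get?_fn {L : List ((Int × Int) × Int)} {F : (Int × Int) → Int}
    (hs : ∀ p ∈ L, p.2 = F p.1) {k : Int × Int} (hm : (k, F k) ∈ L) :
    (PySem.Dict.mk L).get? k = some (F k) := by
  induction L with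
  | nil => cases hm
  | cons p rest ih =>
    rw [PySem.Dict.get?_mk_cons]
    by_cases h : p.1 = k
    · have hv := hs p (by simp)
      have hb : (p.1 == k) = true := by simpa using h
      rw [hb]
      simp [hv, h]
    · have hb : (p.1 == k) = false := by simpa using h
      rw [hb]
      simp only [Bool.false_eq_true, if_false]
      refine ih (fun q hq => hs q (List.mem_cons_of_mem _ hq)) ?_
      rcases List.mem_cons.mp hm with h' | h'
      · exact absurd (congrArg Prod.fst h'.symm) h
      · exact h'

lemma getD_fn {L : List ((Int × Int) × Int)} {F : (Int × Int) → Int}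
    (hs : ∀ p ∈ L, p.2 = F p.1) {k : Int × Int} (hm : (k, F k) ∈ L) :
    (PySem.Dict.mk L).getD k 0 = F k := by
  rw [PySem.Dict.getD_eq_get?_getD, get?_fn hs hm]; rfl

lemma shape_full (e : List (String × String × Int)) (σ : Int) (vl wl : List Char) (i j : Nat) :
    ∀ p ∈ fullItems e σ vl wl i j, p.2 = Ftbl e σ vl wl p.1 := by
  intro p hp
  simp only [fullItems, initItems, bodyPart, List.mem_append, List.mem_map, List.mem_flatMap,
    List.mem_range, List.mem_range'_1] at hp
  rcases hp with (⟨a, ha, rfl⟩ | ⟨b, hb, rfl⟩) | (⟨a, ha, b, hb, rfl⟩ | ⟨b, hb, rfl⟩) <;>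
    simp [Ftbl, tbl_zero_left, tbl_zero_right, show ∀ x : Nat, ((x : Int) + 1).toNat = x + 1 from by omega]

lemma mem_full (e : List (String × String × Int)) (σ : Int) (vl wl : List Char) (i j a b : Nat)
    (h : (b = 0 ∧ a ≤ vl.length) ∨ (a = 0 ∧ b ≤ wl.length)
      ∨ (1 ≤ a ∧ a ≤ i ∧ 1 ≤ b ∧ b ≤ wl.length) ∨ (a = i + 1 ∧ 1 ≤ b ∧ b ≤ j)) :
    (((a : Int), (b : Int)), tbl e σ vl wl a b) ∈ fullItems e σ vl wl i j := by
  unfold fullItems initItems bodyPart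
  rcases h with ⟨hb, ha⟩ | ⟨ha, hb⟩ | ⟨ha1, ha2, hb1, hb2⟩ | ⟨ha, hb1, hb2⟩
  · subst hb
    rw [tbl_zero_right]
    refine List.mem_append_left _ (List.mem_append_left _
      (List.mem_map.mpr ⟨a, List.mem_range.mpr (by omega), ?_⟩))
    norm_num
  · subst ha
    by_cases hb0 : b = 0
    · subst hb0
      rw [tbl_zero_right]
      refine List.mem_append_left _ (List.mem_append_left _
        (List.mem_map.mpr ⟨0, List.mem_range.mpr (by omega), ?_⟩))
      norm_num
    · rw [tbl_zero_left]
      refine List.mem_append_left _ (List.mem_append_right _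
        (List.mem_map.mpr ⟨b, List.mem_range'_1.mpr (by omega), ?_⟩))
      norm_num
  · refine List.mem_append_right _ (List.mem_append_left _ (List.mem_flatMap.mpr
      ⟨a - 1, List.mem_range.mpr (by omega), List.mem_map.mpr
        ⟨b - 1, List.mem_range.mpr (by omega), ?_⟩⟩))
    have h1 : a - 1 + 1 = a := by omega
    have h2 : b - 1 + 1 = b := by omega
    have h1i : ((a - 1 : Nat) : Int) + 1 = (a : Int) := by omega
    have h2i : ((b - 1 : Nat) : Int) + 1 = (b : Int) := by omega
    rw [h1, h2, h1i, h2i]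
  · subst ha
    refine List.mem_append_right _ (List.mem_append_right _ (List.mem_map.mpr
      ⟨b - 1, List.mem_range.mpr (by omega), ?_⟩))
    have h2 : b - 1 + 1 = b := by omega
    have h2i : ((b - 1 : Nat) : Int) + 1 = (b : Int) := by omega
    rw [h2, h2i]
    push_cast
    rfl

lemma fresh_full (e : List (String × String × Int)) (σ : Int) (vl wl : List Char) (i j : Nat) :
    ((i : Int) + 1, (j : Int) + 1) ∉ (fullItems e σ vl wl i j).map Prod.fst := by
  intro hmem
  rcases List.mem_map.mp hmem with ⟨p, hp, hk⟩
  unfold fullItems initItems bodyPart at hp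
  rcases List.mem_append.mp hp with h | h
  · rcases List.mem_append.mp h with h | h
    · rcases List.mem_map.mp h with ⟨x, hx, rfl⟩
      simp only [Prod.mk.injEq] at hk
      omega
    · rcases List.mem_map.mp h with ⟨x, hx, rfl⟩
      simp only [Prod.mk.injEq] at hk
      omega
  · rcases List.mem_append.mp h with h | h
    · rcases List.mem_flatMap.mp h with ⟨x, hx, h2⟩
      rcases List.mem_map.mp h2 with ⟨y, hy, rfl⟩
      have hx' := List.mem_range.mp hx
      simp only [Prod.mk.injEq] at hk
      omega
    · rcases List.mem_map.mp h with ⟨y, hy, rfl⟩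
      have hy' := List.mem_range.mp hy
      simp only [Prod.mk.injEq] at hk
      omega

lemma getD_full (e : List (String × String × Int)) (σ : Int) (vl wl : List Char) (i j a b : Nat)
    (h : (b = 0 ∧ a ≤ vl.length) ∨ (a = 0 ∧ b ≤ wl.length)
      ∨ (1 ≤ a ∧ a ≤ i ∧ 1 ≤ b ∧ b ≤ wl.length) ∨ (a = i + 1 ∧ 1 ≤ b ∧ b ≤ j))
    (d : PySem.Dict (Int × Int) Int) (hd : d.items = fullItems e σ vl wl i j) :
    d.getD ((a : Int), (b : Int)) 0 = tbl e σ vl wl a b := by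
  have hdm : d = PySem.Dict.mk (fullItems e σ vl wl i j) := PySem.Dict.ext (by simpa using hd)
  subst hdm
  have hF : Ftbl e σ vl wl ((a : Int), (b : Int)) = tbl e σ vl wl a b := by
    simp [Ftbl]
  rw [getD_fn (shape_full e σ vl wl i j) (by rw [hF]; exact mem_full e σ vl wl i j a b h), hF]

lemma insert_step (e : List (String × String × Int)) (σ : Int) (vl wl : List Char) (i j : Nat)
    (d : PySem.Dict (Int × Int) Int) (hd : d.items = fullItems e σ vl wl i j) :
    (d.insert ((i : Int) + 1, (j : Int) + 1) (tbl e σ vl wl (i + 1) (j + 1))).items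
      = fullItems e σ vl wl i (j + 1) := by
  have hc : d.contains ((i : Int) + 1, (j : Int) + 1) = false := by
    rw [PySem.Dict.contains_eq_decide_mem_keys]
    simp only [PySem.Dict.keys, hd, decide_eq_false_iff_not]
    exact fresh_full e σ vl wl i j
  rw [PySem.Dict.items_insert_of_not_contains _ _ hc, hd]
  simp only [fullItems, bodyPart, List.range_succ, List.map_append, List.append_assoc]
  rfl

lemma aCell_items (e : List (String × String × Int)) (σ : Int) (vl wl : List Char)
    (d : PySem.Dict (Int × Int) Int) (i j : Nat) (hi : i < vl.length) (hj : j < wl.length)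
    (hd : d.items = fullItems e σ vl wl i j) :
    (aCell e σ vl wl d i j).items = fullItems e σ vl wl i (j + 1) := by
  have k1 : ((i : Int), (j : Int) + 1) = (((i : Nat) : Int), (((j + 1 : Nat)) : Int)) := by push_cast; rfl
  have k2 : ((i : Int) + 1, (j : Int)) = ((((i + 1 : Nat)) : Int), ((j : Nat) : Int)) := by push_cast; rfl
  simp only [aCell]
  rw [k1, getD_full e σ vl wl i j i (j + 1) (by omega) d hd]
  rw [k2, getD_full e σ vl wl i j (i + 1) j (by omega) d hd]
  rw [getD_full e σ vl wl i j i j (by omega) d hd]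
  rw [clampmax σ (tbl e σ vl wl i (j + 1)) (tbl e σ vl wl (i + 1) j) _]
  rw [← tbl_succ e σ vl wl i j]
  exact insert_step e σ vl wl i j d hd

lemma emit_inner (e : List (String × String × Int)) (σ : Int) (vl wl : List Char)
    (g : PySem.Dict (Int × Int) Int → Nat → Nat → PySem.Dict (Int × Int) Int)
    (hg : ∀ d i j, i < vl.length → j < wl.length → d.items = fullItems e σ vl wl i j →
      (g d i j).items = fullItems e σ vl wl i (j + 1))
    (i : Nat) (hi : i < vl.length) :
    ∀ (j : Nat), j ≤ wl.length → ∀ d, d.items = fullItems e σ vl wl i 0 →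
      ((List.range j).foldl (fun d j => g d i j) d).items = fullItems e σ vl wl i j := by
  intro j
  induction j with
  | zero => intro _ d hd; simpa using hd
  | succ j ih =>
    intro hj d hd
    rw [List.range_succ, List.foldl_append, List.foldl_cons, List.foldl_nil]
    exact hg _ i j hi (by omega) (ih (by omega) d hd)

lemma bodyPart_roll (e : List (String × String × Int)) (σ : Int) (vl wl : List Char) (i : Nat) :
    bodyPart e σ vl wl i wl.length = bodyPart e σ vl wl (i + 1) 0 := by
  simp [bodyPart, List.range_succ, List.flatMap_append]

lemma emit_outer (e : List (String × String × Int)) (σ : Int) (vl wl : List Char)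
    (g : PySem.Dict (Int × Int) Int → Nat → Nat → PySem.Dict (Int × Int) Int)
    (hg : ∀ d i j, i < vl.length → j < wl.length → d.items = fullItems e σ vl wl i j →
      (g d i j).items = fullItems e σ vl wl i (j + 1))
    (initOK : (initDict vl.length wl.length).items = initItems vl.length wl.length) :
    ((List.range vl.length).foldl (fun d i => (List.range wl.length).foldl (fun d j => g d i j) d)
      (initDict vl.length wl.length)).items = fullItems e σ vl wl vl.length 0 := by
  suffices h : ∀ i ≤ vl.length,
      ((List.range i).foldl (fun d i => (List.range wl.length).foldl (fun d j => g d i j) d)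
        (initDict vl.length wl.length)).items = fullItems e σ vl wl i 0 from
    h vl.length le_rfl
  intro i
  induction i with
  | zero =>
    intro _
    simp only [List.range_zero, List.foldl_nil, initOK, fullItems, bodyPart]
    simp
  | succ i ih =>
    intro hi
    rw [List.range_succ, List.foldl_append, List.foldl_cons, List.foldl_nil]
    have hroll : fullItems e σ vl wl (i + 1) 0 = fullItems e σ vl wl i wl.length := by
      unfold fullItems
      rw [bodyPart_roll]
    rw [hroll]
    exact emit_inner e σ vl wl g hg i (by omega) wl.length le_rfl _ (ih (by omega))

lemma initDict_items (n m : Nat) : (initDict n m).items = initItems n m := by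
  unfold initDict
  have hs0 : ((List.range (n + 1)).foldl (fun d (i : Nat) => d.insert ((i : Int), (0 : Int)) 0) (PySem.Dict.empty : PySem.Dict (Int × Int) Int)).items
      = (List.range (n + 1)).map (fun (i : Nat) => (((i : Int), (0 : Int)), (0 : Int))) := by
    exact PySem.Dict.items_foldl_insert_fresh (List.range (n + 1))
      (fun (i : Nat) => ((i : Int), (0 : Int))) (fun _ => (0 : Int)) (PySem.Dict.empty : PySem.Dict (Int × Int) Int)
      (fun a _ => by simp) (List.Nodup.map
        (fun a b h => Nat.cast_injective (congrArg Prod.fst h)) List.nodup_range)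
  rw [show List.range (m + 1) = 0 :: List.range' 1 m by rw [List.range_eq_range', List.range'_succ]]
  rw [List.foldl_cons]
  simp only [Nat.cast_zero]
  have hc : (((List.range (n + 1)).foldl (fun d (i : Nat) => d.insert ((i : Int), (0 : Int)) 0) (PySem.Dict.empty : PySem.Dict (Int × Int) Int))).contains ((0 : Int), (0 : Int)) = true := by
    rw [PySem.Dict.contains_eq_decide_mem_keys]
    refine decide_eq_true ?_
    simp only [PySem.Dict.keys, hs0]
    rw [List.map_map]
    refine List.mem_map.mpr ⟨0, List.mem_range.mpr (Nat.succ_pos n), ?_⟩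
    norm_num
  have hid : (((List.range (n + 1)).foldl (fun d (i : Nat) => d.insert ((i : Int), (0 : Int)) 0) (PySem.Dict.empty : PySem.Dict (Int × Int) Int)).insert ((0 : Int), (0 : Int)) 0).items
      = (List.range (n + 1)).map (fun (i : Nat) => (((i : Int), (0 : Int)), (0 : Int))) := by
    rw [PySem.Dict.items_insert_of_contains _ (0 : Int) hc, hs0]
    rw [List.map_map]
    apply List.map_congr_left
    intro a _
    by_cases h : a = 0
    · subst h; rfl
    · have hne : ((((a : Nat) : Int), (0 : Int)) == ((0 : Int), (0 : Int))) = false := by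
        refine beq_eq_false_iff_ne.mpr ?_
        intro hcon
        have h1 : ((a : Nat) : Int) = 0 := congrArg Prod.fst hcon
        exact h (by exact_mod_cast h1)
      simp [Function.comp, hne]
  have hfin : ((List.range' 1 m).foldl (fun d (j : Nat) => d.insert ((0 : Int), (j : Int)) 0)
        (((List.range (n + 1)).foldl (fun d (i : Nat) => d.insert ((i : Int), (0 : Int)) 0) (PySem.Dict.empty : PySem.Dict (Int × Int) Int)).insert ((0 : Int), (0 : Int)) 0)).items
      = (((List.range (n + 1)).foldl (fun d (i : Nat) => d.insert ((i : Int), (0 : Int)) 0) (PySem.Dict.empty : PySem.Dict (Int × Int) Int)).insert ((0 : Int), (0 : Int)) 0).items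
        ++ (List.range' 1 m).map (fun (j : Nat) => (((0 : Int), (j : Int)), (0 : Int))) := by
    exact PySem.Dict.items_foldl_insert_fresh (List.range' 1 m)
      (fun (j : Nat) => ((0 : Int), (j : Int))) (fun _ => (0 : Int)) _
      (fun a ha => by
        rw [PySem.Dict.contains_eq_decide_mem_keys]
        refine decide_eq_false ?_
        simp only [PySem.Dict.keys, hid]
        intro hmem
        rcases List.mem_map.mp hmem with ⟨q, hq, hk⟩
        rcases List.mem_map.mp hq with ⟨x, _, rfl⟩
        have ha1 : 1 ≤ a := (List.mem_range'_1.mp ha).1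
        simp only [Prod.mk.injEq] at hk
        omega)
      (List.Nodup.map (fun a b h => Nat.cast_injective (congrArg Prod.snd h)) (List.nodup_range' 1))
  rw [hfin, hid]
  rfl

-- ===== VERDICT (by name: the statement is the Claim_ definition above) =====
theorem lcs_score_backtrack_spec : Claim_equal_lcs_score_backtrack := by
  intro edges v w sigma _hdom _hpre
  unfold Spec_lcs_score_backtrack lcs_score_backtrack lcs_score_backtrack_alt
  simp only
  congr 1
  have hA := emit_outer edges sigma v.toList w.toList (aCell edges sigma v.toList w.toList)
    (fun d i j hi hj hd => aCell_items edges sigma v.toList w.toList d i j hi hj hd)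
    (initDict_items _ _)
  have hB := emit_outer edges sigma v.toList w.toList
    (fun d i j => d.insert ((i : Int) + 1, (j : Int) + 1)
      ((fillB edges sigma v.toList w.toList (v.toList.length + w.toList.length + 1) v.toList.length w.toList.length PySem.Dict.empty).2.getD
        ((i : Int) + 1, (j : Int) + 1) 0))
    (fun d i j hi hj hd => by
      dsimp only
      rw [fillB_getD edges sigma v.toList w.toList i j hi hj]
      exact insert_step edges sigma v.toList w.toList i j d hd)
    (initDict_items _ _)
  rw [hA, hB]
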